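-- pv_equiv track=rewrite | github.com/JaredMontesCandela/Algoritmos_Y_Aplicaciones | AlgoritmoDeOrdenamiento_Insercion_ Hashing.py | hash_sort
-- ===== SOURCE A (Python) =====
-- def hash_function(value, num_buckets):
--
--     return value % num_buckets
--
-- def insertion_sort(arr):
--     """
--     Ordena una lista de elementos utilizando el algoritmo de ordenamiento por inserción directa.
--
--     Parámetros:
--     arr (list): Lista de elementos a ordenar.
--
--     Retorna:
--     list: Lista de elementos ordenados.
--     """
--     for i in range(1, len(arr)):
--         key = arr[i]
--         j = i - 1
--         while j >= 0 and arr[j] > key: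
--             arr[j + 1] = arr[j]
--             j -= 1
--         arr[j + 1] = key
--     return arr
--
-- def hash_sort(arr, num_buckets):
--     """
--     Ordena una lista de elementos utilizando el algoritmo de ordenamiento por hashing.
--
--     Parámetros:
--     arr (list): Lista de elementos a ordenar.
--     num_buckets (int): Número de cubetas a utilizar.
--
--     Retorna:
--     list: Lista de elementos ordenados.
--     """
--     # Crear cubetas vacías
--     buckets = [[] for _ in range(num_buckets)]
--
--     # Distribuir los elementos en las cubetas
--     for value in arr:
--         bucket_index = hash_function(value, num_buckets)
--         buckets[bucket_index].append(value)
--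
--     # Ordenar cada cubeta y combinar los resultados
--     sorted_arr = []
--     for bucket in buckets:
--         sorted_arr.extend(insertion_sort(bucket))
--
--     return sorted_arr
-- ===== SOURCE B (Python) =====
-- def hash_sort(arr, num_buckets):
--     # Sort once up front, then distribute into buckets; stability of sorted()
--     # keeps each bucket ascending, so no per-bucket sort is needed.
--     buckets = [[] for _ in range(num_buckets)]
--     for value in sorted(arr):
--         buckets[value % num_buckets].append(value)
--     result = []
--     for bucket in buckets:
--         result += bucket
--     return result
-- ===== Notes on version B (the rewrite author's own statement) =====
-- stated objective: faster
-- what changed: B sorts the whole list once up front and then only distributes into buckets (stability keeps each bucket ascending), dropping the per-bucket insertion sort entirely.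
import Mathlib
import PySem

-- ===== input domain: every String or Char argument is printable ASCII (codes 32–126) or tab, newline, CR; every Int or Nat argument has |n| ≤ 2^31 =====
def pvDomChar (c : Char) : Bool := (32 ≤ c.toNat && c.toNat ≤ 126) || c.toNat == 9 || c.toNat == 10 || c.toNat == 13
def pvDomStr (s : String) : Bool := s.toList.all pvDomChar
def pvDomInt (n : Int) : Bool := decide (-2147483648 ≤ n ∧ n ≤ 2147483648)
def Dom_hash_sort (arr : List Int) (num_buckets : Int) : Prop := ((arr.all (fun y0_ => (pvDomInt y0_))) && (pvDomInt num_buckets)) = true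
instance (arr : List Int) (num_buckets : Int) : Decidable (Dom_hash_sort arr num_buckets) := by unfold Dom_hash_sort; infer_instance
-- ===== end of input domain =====

-- B sorts the whole list once up front and then only distributes into buckets (stability keeps
-- each bucket ascending), dropping the per-bucket insertion sort; equivalence on the return value.

-- ===== PORT A =====
-- buckets[j].append(v) (indices are in range under Pre_)
def pvAppendAt (bs : List (List Int)) (j : Nat) (v : Int) : List (List Int) :=
  bs.modify j (fun b => b ++ [v])

-- the inner while-loop of insertion_sort: shift elements > key right, drop key in place,
-- i.e. insert key before the first strictly greater element of the sorted prefix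
def pvInsert (key : Int) : List Int → List Int
  | [] => [key]
  | y :: ys => if key < y then key :: y :: ys else y :: pvInsert key ys

-- insertion_sort: for i in range(1, len(arr)): insert arr[i] into the sorted prefix
def insertion_sort (arr : List Int) : List Int :=
  arr.foldl (fun acc key => pvInsert key acc) []

def hash_sort (arr : List Int) (num_buckets : Int) : List Int :=
  let buckets := List.replicate num_buckets.toNat ([] : List Int)
  let buckets := arr.foldl
    (fun bs value => pvAppendAt bs (PySem.Int.mod value num_buckets).toNat value) buckets
  buckets.foldl (fun sorted_arr bucket => sorted_arr ++ insertion_sort bucket) []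

-- ===== PORT B =====
def hash_sort_alt (arr : List Int) (num_buckets : Int) : List Int :=
  let buckets := List.replicate num_buckets.toNat ([] : List Int)
  let ordered := PySem.List.sorted arr (fun x => x)
  let buckets := ordered.foldl
    (fun bs value => pvAppendAt bs (PySem.Int.mod value num_buckets).toNat value) buckets
  buckets.foldl (fun result bucket => result ++ bucket) []

-- ===== PRECONDITION & SPEC =====
-- Pre_ excludes exactly the inputs where A raises: with a nonempty arr, num_buckets = 0 gives
-- ZeroDivisionError and num_buckets < 0 gives IndexError (no buckets exist); B raises there too.
def Pre_hash_sort (arr : List Int) (num_buckets : Int) : Prop :=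
  0 < num_buckets ∨ arr = []
instance (arr : List Int) (num_buckets : Int) : Decidable (Pre_hash_sort arr num_buckets) := by
  unfold Pre_hash_sort; infer_instance

def pvWitness_hash_sort : List Int × Int := ([7, -3, 12, 0, 7], 3)

def Spec_hash_sort (arr : List Int) (num_buckets : Int) (out : List Int) : Prop := out = hash_sort_alt arr num_buckets
instance (arr : List Int) (num_buckets : Int) (out : List Int) : Decidable (Spec_hash_sort arr num_buckets out) := by unfold Spec_hash_sort; infer_instance

-- ===== CLAIM (what is proved, stated in full; the proofs are below) =====
def Claim_equal_hash_sort : Prop := ∀ (arr : List Int) (num_buckets : Int), Dom_hash_sort arr num_buckets → Pre_hash_sort arr num_buckets → Spec_hash_sort arr num_buckets (hash_sort arr num_buckets)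

-- ===== LEMMAS AND PROOFS =====

theorem pvInsert_eq_insertBy (key : Int) (l : List Int) :
    pvInsert key l = PySem.List.insertBy (fun a b => decide (a < b)) key l := by
  induction l with
  | nil => rfl
  | cons y ys ih => simp [pvInsert, PySem.List.insertBy, ih]

theorem insertion_sort_eq_sorted (arr : List Int) :
    insertion_sort arr = PySem.List.sorted arr (fun x => x) := by
  rw [PySem.List.sorted_eq_foldl_insertBy]
  unfold insertion_sort
  simp [pvInsert_eq_insertBy]

theorem pvAppendAt_length (l : List (List Int)) (j : Nat) (v : Int) :
    (pvAppendAt l j v).length = l.length := by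
  simp [pvAppendAt]

theorem getElem_pvAppendAt (l : List (List Int)) (j : Nat) (v : Int) (i : Nat)
    (hi : i < l.length) :
    (pvAppendAt l j v)[i]'(by rw [pvAppendAt_length]; exact hi)
      = if i = j then l[i] ++ [v] else l[i] := by
  unfold pvAppendAt
  rw [List.getElem_modify]
  by_cases h : i = j
  · simp [h]
  · simp [h, Ne.symm h]

theorem pvAppendAt_map_range (n j : Nat) (g : Nat → List Int) (v : Int) (_hj : j < n) :
    pvAppendAt ((List.range n).map g) j v
      = (List.range n).map (fun i => if i = j then g i ++ [v] else g i) := by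
  apply List.ext_getElem
  · simp [pvAppendAt_length]
  · intro i h1 h2
    have hi : i < ((List.range n).map g).length := by simpa using h2
    rw [getElem_pvAppendAt _ j v i hi]
    simp

-- the distribution loop puts exactly the elements with bucket index i into bucket i, in order
theorem distribute_eq (nb : Int) (n : Nat) :
    ∀ (xs : List Int) (g : Nat → List Int),
      (∀ v ∈ xs, (PySem.Int.mod v nb).toNat < n) →
      xs.foldl (fun bs value => pvAppendAt bs (PySem.Int.mod value nb).toNat value)
          ((List.range n).map g)
        = (List.range n).map
            (fun i => g i ++ xs.filter (fun v => (PySem.Int.mod v nb).toNat == i)) := by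
  intro xs
  induction xs with
  | nil => intro g _; simp
  | cons v xs ih =>
    intro g hlt
    have hv : (PySem.Int.mod v nb).toNat < n := hlt v (by simp)
    simp only [List.foldl_cons]
    rw [pvAppendAt_map_range n _ g v hv,
        ih _ (fun w hw => hlt w (by simp [hw]))]
    apply List.map_congr_left
    intro i hi
    by_cases h : (PySem.Int.mod v nb).toNat = i
    · simp [h]
    · simp [h, Ne.symm h]

theorem bucket_sorted (nb : Int) (i : Nat) (arr : List Int) :
    insertion_sort (arr.filter (fun v => (PySem.Int.mod v nb).toNat == i))
      = (PySem.List.sorted arr (fun x => x)).filter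
          (fun v => (PySem.Int.mod v nb).toNat == i) := by
  rw [insertion_sort_eq_sorted]
  apply PySem.List.sorted_id_eq_of_perm_of_pairwise
  · exact (PySem.List.sorted_perm arr (fun x => x) false).filter _
  · exact (PySem.List.sorted_pairwise arr (fun x => x)).filter _

theorem idx_lt (nb : Int) (h : 0 < nb) (v : Int) :
    (PySem.Int.mod v nb).toNat < nb.toNat := by
  have h1 := PySem.Int.mod_nonneg v (b := nb) h
  have h2 := PySem.Int.mod_lt v (b := nb) h
  omega

-- ===== VERDICT (by name: the statement is the Claim_ definition above) =====
theorem hash_sort_spec : Claim_equal_hash_sort := by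
  intro arr nb _ hpre
  unfold Spec_hash_sort hash_sort hash_sort_alt
  have hlt : ∀ v ∈ arr, (PySem.Int.mod v nb).toNat < nb.toNat := by
    rcases hpre with h | h
    · exact fun v _ => idx_lt nb h v
    · subst h; intro v hv; simp at hv
  have hlt' : ∀ v ∈ PySem.List.sorted arr (fun x => x),
      (PySem.Int.mod v nb).toNat < nb.toNat := by
    intro v hv
    exact hlt v ((PySem.List.sorted_perm arr (fun x => x) false).mem_iff.mp hv)
  have hrep : List.replicate nb.toNat ([] : List Int)
      = (List.range nb.toNat).map (fun _ => []) := by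
    simp
  simp only [hrep, distribute_eq nb nb.toNat arr _ hlt,
    distribute_eq nb nb.toNat _ _ hlt',
    PySem.List.foldl_append_eq_flatMap, List.nil_append]
  rw [PySem.List.foldl_append_eq_flatMap (fun b => b), List.nil_append]
  rw [List.flatMap_map, List.flatMap_map]
  apply List.flatMap_congr
  intro i _
  simpa using bucket_sorted nb i arr
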